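-- pv_equiv track=rewrite | github.com/squallyaohao/MyNukeTools | BreakRenderPass.py | prepareForAutoComp
-- ===== SOURCE A (Python) =====
-- LIGHTPASSES = ('diffuse','globalillumin','lighting','glossy','reflection','coat','transmission','sss','emission','emit','volume')
--
-- def prepareForAutoComp(layer_list):
--     light_passes = []
--     non_light_passes = []
--     for light_pass in LIGHTPASSES:
--         for n in layer_list:
--             if n.lower().find(light_pass)>-1 and (n not in light_passes):
--                 light_passes.append(n)
--                 continue
--
--
--     non_light_passes = [n for n in layer_list if n not in light_passes]
--     return light_passes,non_light_passes
-- ===== SOURCE B (Python) =====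
-- LIGHTPASSES = ('diffuse','globalillumin','lighting','glossy','reflection','coat','transmission','sss','emission','emit','volume')
--
-- def prepareForAutoComp(layer_list):
--     # One pass: drop each layer into the bucket of its first matching keyword
--     # (deduplicating by value), or into non_light_passes if nothing matches.
--     buckets = [[] for _ in LIGHTPASSES]
--     non_light_passes = []
--     seen = set()
--     for n in layer_list:
--         low = n.lower()
--         idx = next((i for i, kw in enumerate(LIGHTPASSES) if kw in low), None)
--         if idx is None:
--             non_light_passes.append(n)
--         elif n not in seen:
--             seen.add(n)
--             buckets[idx].append(n)
--     light_passes = [n for b in buckets for n in b]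
--     return light_passes, non_light_passes
-- ===== Notes on version B (the rewrite author's own statement) =====
-- stated objective: faster
-- what changed: A's keyword-major double loop (11 scans of layer_list, each with a linear membership test against the growing light_passes list, plus a final membership-filter pass) is replaced by a single pass over layer_list that drops each distinct layer into the bucket of its first matching keyword (a seen-set replaces the list membership tests) and then concatenates the buckets, reproducing A's keyword-major ordering.
import Mathlib
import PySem

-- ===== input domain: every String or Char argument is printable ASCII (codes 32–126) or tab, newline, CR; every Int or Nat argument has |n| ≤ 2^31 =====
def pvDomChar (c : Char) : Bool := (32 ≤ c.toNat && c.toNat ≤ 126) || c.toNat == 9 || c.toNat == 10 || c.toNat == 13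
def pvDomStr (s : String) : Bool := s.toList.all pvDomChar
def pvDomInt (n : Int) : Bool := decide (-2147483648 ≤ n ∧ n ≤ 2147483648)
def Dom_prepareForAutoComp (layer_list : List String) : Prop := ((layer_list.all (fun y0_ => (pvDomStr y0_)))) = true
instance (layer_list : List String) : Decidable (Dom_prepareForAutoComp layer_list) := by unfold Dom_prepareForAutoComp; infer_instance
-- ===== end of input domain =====

-- B replaces A's keyword-major double loop by a single pass over the layers that buckets each
-- distinct layer under its first matching keyword (measured faster in a timing run).

-- ===== PORT A =====
def LIGHTPASSES : List String :=
  ["diffuse","globalillumin","lighting","glossy","reflection","coat","transmission","sss","emission","emit","volume"]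

def prepareForAutoComp (layer_list : List String) : List String × List String :=
  let light_passes : List String :=
    LIGHTPASSES.foldl (fun light_passes light_pass =>
      layer_list.foldl (fun light_passes n =>
        if PySem.Str.find (PySem.Str.lower n) light_pass > -1 ∧ n ∉ light_passes
        then light_passes ++ [n] else light_passes) light_passes) []
  let non_light_passes := layer_list.filter (fun n => n ∉ light_passes)
  (light_passes, non_light_passes)

-- ===== PORT B =====
-- helper: index of the first keyword of kws (numbered from i) occurring in low, none if none does
def firstKwAux (kws : List String) (i : Nat) (low : String) : Option Nat :=
  match kws with
  | [] => none
  | kw :: rest => if PySem.Str.isIn kw low then some i else firstKwAux rest (i + 1) low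

def prepareForAutoComp_alt (layer_list : List String) : List String × List String :=
  let st : List (List String) × List String × PySem.Set String :=
    layer_list.foldl
      (fun st n =>
        let buckets := st.1
        let non_light_passes := st.2.1
        let seen := st.2.2
        match firstKwAux LIGHTPASSES 0 (PySem.Str.lower n) with
        | none => (buckets, non_light_passes ++ [n], seen)
        | some i =>
          if n ∉ seen then (buckets.set i (buckets.getD i [] ++ [n]), non_light_passes, seen.add n)
          else st)
      (List.replicate LIGHTPASSES.length [], [], PySem.Set.empty)
  (st.1.flatten, st.2.1)

-- ===== PRECONDITION & SPEC =====
def Spec_prepareForAutoComp (layer_list : List String) (out : List String × List String) : Prop := out = prepareForAutoComp_alt layer_list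
instance (layer_list : List String) (out : List String × List String) : Decidable (Spec_prepareForAutoComp layer_list out) := by unfold Spec_prepareForAutoComp; infer_instance

-- ===== CLAIM (what is proved, stated in full; the proofs are below) =====
def Claim_equal_prepareForAutoComp : Prop := ∀ (layer_list : List String), Dom_prepareForAutoComp layer_list → Spec_prepareForAutoComp layer_list (prepareForAutoComp layer_list)

-- ===== LEMMAS AND PROOFS =====

-- first matching keyword index of a layer
def fkOf (n : String) : Option Nat := firstKwAux LIGHTPASSES 0 (PySem.Str.lower n)

-- distinct layers of ll whose first matching keyword is i, in first-occurrence order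
def canonB (i : Nat) (ll : List String) : List String :=
  PySem.List.dedup (ll.filter (fun n => fkOf n == some i))

def canonPartial (j : Nat) (ll : List String) : List String :=
  ((List.range j).map (fun i => canonB i ll)).flatten

def canonN (ll : List String) : List String := ll.filter (fun n => fkOf n == none)

def seenOf (ll : List String) : PySem.Set String :=
  PySem.Set.ofList (ll.filter (fun n => (fkOf n).isSome))

lemma firstKwAux_some_lt : ∀ (kws : List String) (i : Nat) (low : String) (j : Nat),
    firstKwAux kws i low = some j →
    ∃ k, ∃ _ : k < kws.length, j = i + k ∧ PySem.Str.isIn kws[k] low = true := by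
  intro kws
  induction kws with
  | nil => intro i low j h; simp [firstKwAux] at h
  | cons kw rest ih =>
    intro i low j h
    simp only [firstKwAux] at h
    by_cases hm : PySem.Str.isIn kw low = true
    · rw [if_pos hm] at h
      obtain rfl : i = j := Option.some.inj h
      exact ⟨0, by simp, by omega, by simpa using hm⟩
    · rw [if_neg hm] at h
      obtain ⟨k, hk, hj, hmk⟩ := ih (i + 1) low j h
      exact ⟨k + 1, by simpa using hk, by omega, by simpa using hmk⟩

lemma firstKwAux_of_match : ∀ (kws : List String) (i : Nat) (low : String) (k : Nat)
    (hk : k < kws.length), PySem.Str.isIn kws[k] low = true →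
    ∃ j, firstKwAux kws i low = some j ∧ j ≤ i + k := by
  intro kws
  induction kws with
  | nil => intro i low k hk; simp at hk
  | cons kw rest ih =>
    intro i low k hk h
    by_cases hm : PySem.Str.isIn kw low = true
    · exact ⟨i, by simp only [firstKwAux]; rw [if_pos hm], by omega⟩
    · match k with
      | 0 => simp_all
      | k + 1 =>
        obtain ⟨j, hj, hle⟩ := ih (i + 1) low k (by simpa using hk) (by simpa using h)
        refine ⟨j, ?_, by omega⟩
        simp only [firstKwAux]
        rw [if_neg hm]
        exact hj

lemma fkOf_some (n : String) (i : Nat) (h : fkOf n = some i) :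
    ∃ _ : i < 11, PySem.Str.isIn (LIGHTPASSES.get ⟨i, by simpa [LIGHTPASSES] using ‹i < 11›⟩) (PySem.Str.lower n) = true := by
  obtain ⟨k, hk, hik, hm⟩ := firstKwAux_some_lt LIGHTPASSES 0 (PySem.Str.lower n) i h
  have hik' : i = k := by omega
  subst hik'
  exact ⟨by simpa [LIGHTPASSES] using hk, by simpa using hm⟩

lemma fkOf_of_match (n : String) (k : Nat) (hk : k < 11)
    (h : PySem.Str.isIn (LIGHTPASSES.get ⟨k, by simpa [LIGHTPASSES] using hk⟩) (PySem.Str.lower n) = true) :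
    ∃ i, fkOf n = some i ∧ i ≤ k := by
  obtain ⟨j, hj, hle⟩ := firstKwAux_of_match LIGHTPASSES 0 (PySem.Str.lower n) k
    (by simpa [LIGHTPASSES] using hk) (by simpa using h)
  exact ⟨j, hj, by omega⟩

-- A's test `n.lower().find(kw) > -1` is the same as `kw in n.lower()`
lemma find_pos_iff_isIn (kw n : String) :
    (PySem.Str.find (PySem.Str.lower n) kw > -1) ↔ PySem.Str.isIn kw (PySem.Str.lower n) = true := by
  have h1 := PySem.Str.find_ne_neg_one_iff (PySem.Str.lower n) kw
  have h2 := PySem.Str.isIn_iff_infix kw (PySem.Str.lower n)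
  have h3 : (-1 : Int) ≤ PySem.Str.find (PySem.Str.lower n) kw := by
    simpa using PySem.Chars.neg_one_le_find (PySem.Str.lower n).toList kw.toList
  constructor
  · intro h; exact h2.mpr (h1.mp (by omega))
  · intro h; have := h1.mpr (h2.mp h); omega

lemma dedup_snoc {α : Type} [BEq α] [LawfulBEq α] (xs : List α) (a : α) :
    PySem.List.dedup (xs ++ [a]) =
      if a ∈ xs then PySem.List.dedup xs else PySem.List.dedup xs ++ [a] := by
  have h : PySem.List.dedup (xs ++ [a]) = PySem.Set.add (PySem.List.dedup xs) a := by
    simp [PySem.List.dedup, PySem.Set.ofList, List.foldl_append]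
  rw [h, PySem.Set.add]
  by_cases hm : a ∈ xs
  · rw [if_pos (by simpa [List.contains_iff_mem, PySem.List.mem_dedup] using hm), if_pos hm]
  · rw [if_neg (by simpa [List.contains_iff_mem, PySem.List.mem_dedup] using hm), if_neg hm]

lemma canonB_snoc (i : Nat) (p : List String) (n : String) :
    canonB i (p ++ [n]) =
      if fkOf n = some i ∧ n ∉ p then canonB i p ++ [n] else canonB i p := by
  by_cases hf : fkOf n = some i
  · have hfa : (p ++ [n]).filter (fun m => fkOf m == some i)
        = p.filter (fun m => fkOf m == some i) ++ [n] := by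
      simp [List.filter_append, hf]
    by_cases hp : n ∈ p
    · rw [if_neg (by simp [hp])]
      simp only [canonB, hfa]
      rw [dedup_snoc, if_pos (by simp [List.mem_filter, hp, hf])]
    · rw [if_pos ⟨hf, hp⟩]
      simp only [canonB, hfa]
      rw [dedup_snoc, if_neg (by simp [List.mem_filter, hp])]
  · rw [if_neg (by simp [hf])]
    have hb : (fkOf n == some i) = false := by simpa using hf
    simp [canonB, List.filter_append, hb]

lemma canonN_snoc (p : List String) (n : String) :
    canonN (p ++ [n]) = if fkOf n = none then canonN p ++ [n] else canonN p := by
  simp only [canonN, List.filter_append, List.filter_cons, List.filter_nil]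
  by_cases hf : fkOf n = none
  · simp [hf]
  · have hb : (fkOf n == none) = false := by simpa [Option.isSome_iff_ne_none] using hf
    rw [if_neg hf]
    simp [hb]

lemma mem_seenOf (p : List String) (n : String) :
    n ∈ seenOf p ↔ n ∈ p ∧ (fkOf n).isSome := by
  simp [seenOf, PySem.Set.mem_ofList, List.mem_filter]

lemma mem_canonPartial (j : Nat) (ll : List String) (n : String) :
    n ∈ canonPartial j ll ↔ ∃ i < j, fkOf n = some i ∧ n ∈ ll := by
  simp only [canonPartial, List.mem_flatten, List.mem_map, List.mem_range]
  constructor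
  · rintro ⟨l, ⟨i, hi, rfl⟩, hn⟩
    simp only [canonB, PySem.List.mem_dedup, List.mem_filter, beq_iff_eq] at hn
    exact ⟨i, hi, hn.2, hn.1⟩
  · rintro ⟨i, hi, hf, hn⟩
    exact ⟨canonB i ll, ⟨i, hi, rfl⟩, by simp [canonB, List.mem_filter, hf, hn]⟩

lemma canonPartial_succ (j : Nat) (ll : List String) :
    canonPartial (j + 1) ll = canonPartial j ll ++ canonB j ll := by
  simp [canonPartial, List.range_succ]

lemma canonB_empty_of_ge (i : Nat) (hi : 11 ≤ i) (ll : List String) : canonB i ll = [] := by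
  have hf : ll.filter (fun n => fkOf n == some i) = [] := by
    rw [List.filter_eq_nil_iff]
    intro n _ hbeq
    obtain ⟨hlt, -⟩ := fkOf_some n i (by simpa using hbeq)
    omega
  simp [canonB, hf, PySem.List.dedup, PySem.Set.ofList, PySem.Set.empty]

-- ===== A-side characterization =====

lemma canonB_nil (i : Nat) : canonB i [] = [] := rfl

lemma canonPartial_ge (ll : List String) : ∀ (j : Nat), 11 ≤ j → canonPartial j ll = canonPartial 11 ll := by
  intro j
  induction j with
  | zero => intro h; omega
  | succ j ih =>
    intro h
    rcases Nat.lt_or_ge j 11 with hj | hj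
    · have : j = 10 := by omega
      subst this; rfl
    · rw [canonPartial_succ, canonB_empty_of_ge j hj, List.append_nil]
      exact ih hj

lemma A_inner (j : Nat) (hj : j < 11) (kw : String)
    (hkw : LIGHTPASSES[j]'(by simpa [LIGHTPASSES] using hj) = kw) (ll : List String) :
    ∀ (t p : List String), ll = p ++ t →
    t.foldl (fun light_passes n =>
        if PySem.Str.find (PySem.Str.lower n) kw > -1 ∧ n ∉ light_passes
        then light_passes ++ [n] else light_passes)
      (canonPartial j ll ++ canonB j p)
    = canonPartial j ll ++ canonB j ll := by
  intro t
  induction t with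
  | nil => intro p h; rw [List.append_nil] at h; subst h; rfl
  | cons n t ih =>
    intro p h
    have hnll : n ∈ ll := by rw [h]; simp
    rw [List.foldl_cons]
    by_cases hm : PySem.Str.isIn kw (PySem.Str.lower n) = true
    · obtain ⟨i, hfi, hile⟩ := fkOf_of_match n j hj (by simpa [List.get_eq_getElem, hkw] using hm)
      rcases Nat.lt_or_ge i j with hilt | hige
      · -- first matching keyword comes strictly earlier: n is already in the accumulator
        have hmemC : n ∈ canonPartial j ll := (mem_canonPartial j ll n).mpr ⟨i, hilt, hfi, hnll⟩
        rw [if_neg (by simp [hmemC])]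
        have hsn : canonB j (p ++ [n]) = canonB j p := by
          rw [canonB_snoc, if_neg (by rintro ⟨hfj, -⟩; rw [hfi] at hfj; simp at hfj; omega)]
        rw [← hsn]
        exact ih (p ++ [n]) (by simp [h])
      · have hij : i = j := by omega
        subst hij
        by_cases hp : n ∈ p
        · have hmemB : n ∈ canonB i p := by
            simp [canonB, List.mem_filter, hfi, hp]
          rw [if_neg (by simp [hmemB])]
          have hsn : canonB i (p ++ [n]) = canonB i p := by
            rw [canonB_snoc, if_neg (by simp [hp])]
          rw [← hsn]
          exact ih (p ++ [n]) (by simp [h])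
        · have hnotacc : n ∉ canonPartial i ll ++ canonB i p := by
            intro hmem
            rcases List.mem_append.mp hmem with hc | hb
            · obtain ⟨i', hi', hfi', -⟩ := (mem_canonPartial i ll n).mp hc
              rw [hfi] at hfi'; simp at hfi'; omega
            · have : n ∈ p := by
                have := (PySem.List.mem_dedup _ _).mp hb
                exact (List.mem_filter.mp this).1
              exact hp this
          rw [if_pos ⟨(find_pos_iff_isIn kw n).mpr hm, hnotacc⟩]
          have hsn : canonB i (p ++ [n]) = canonB i p ++ [n] := by
            rw [canonB_snoc, if_pos ⟨hfi, hp⟩]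
          rw [List.append_assoc, ← hsn]
          exact ih (p ++ [n]) (by simp [h])
    · rw [if_neg (fun hc => hm ((find_pos_iff_isIn kw n).mp hc.1))]
      have hsn : canonB j (p ++ [n]) = canonB j p := by
        rw [canonB_snoc, if_neg (by
          rintro ⟨hfj, -⟩
          obtain ⟨hlt, hmj⟩ := fkOf_some n j hfj
          exact hm (by simpa [← hkw, List.get_eq_getElem] using hmj))]
      rw [← hsn]
      exact ih (p ++ [n]) (by simp [h])

lemma A_outer (ll : List String) :
    ∀ (kws : List String) (j : Nat), LIGHTPASSES.drop j = kws →
    kws.foldl (fun light_passes light_pass =>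
      ll.foldl (fun light_passes n =>
        if PySem.Str.find (PySem.Str.lower n) light_pass > -1 ∧ n ∉ light_passes
        then light_passes ++ [n] else light_passes) light_passes)
      (canonPartial j ll)
    = canonPartial 11 ll := by
  intro kws
  induction kws with
  | nil =>
    intro j h
    have hj : 11 ≤ j := by
      have := List.drop_eq_nil_iff.mp h
      simpa [LIGHTPASSES] using this
    rw [List.foldl_nil, canonPartial_ge ll j hj]
  | cons kw rest ih =>
    intro j h
    have hj : j < 11 := by
      by_contra hge
      rw [List.drop_eq_nil_iff.mpr (by simp [LIGHTPASSES]; omega)] at h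
      simp at h
    have hd := List.drop_eq_getElem_cons (l := LIGHTPASSES) (by simpa [LIGHTPASSES] using hj)
    rw [h] at hd
    obtain ⟨hkw, hrest⟩ := List.cons.inj hd
    rw [List.foldl_cons]
    have hacc : canonPartial j ll = canonPartial j ll ++ canonB j [] := by simp [canonB_nil]
    rw [hacc, A_inner j hj kw hkw.symm ll ll [] (by simp), ← canonPartial_succ]
    exact ih (j + 1) hrest.symm

lemma A_char (ll : List String) :
    prepareForAutoComp ll = (canonPartial 11 ll, canonN ll) := by
  have hl := A_outer ll LIGHTPASSES 0 rfl
  rw [show canonPartial 0 ll = [] from rfl] at hl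
  unfold prepareForAutoComp
  dsimp only
  rw [hl]
  refine Prod.ext rfl ?_
  show ll.filter (fun n => decide (n ∉ canonPartial 11 ll)) = canonN ll
  apply List.filter_congr
  intro n hn
  by_cases hf : fkOf n = none
  · have : n ∉ canonPartial 11 ll := by
      rw [mem_canonPartial]
      rintro ⟨i, -, hfi, -⟩
      rw [hf] at hfi
      simp at hfi
    simp [this, hf]
  · obtain ⟨i, hi⟩ := Option.ne_none_iff_exists'.mp hf
    obtain ⟨hlt, -⟩ := fkOf_some n i hi
    have : n ∈ canonPartial 11 ll := (mem_canonPartial 11 ll n).mpr ⟨i, hlt, hi, hn⟩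
    simp [this, hi]

-- ===== B-side characterization =====

lemma seenOf_snoc (p : List String) (n : String) :
    seenOf (p ++ [n]) = if (fkOf n).isSome then (seenOf p).add n else seenOf p := by
  simp only [seenOf, List.filter_append, List.filter_cons, List.filter_nil]
  by_cases hf : (fkOf n).isSome
  · rw [if_pos hf]
    simp only [hf, if_pos]
    simp [PySem.Set.ofList, List.foldl_append]
  · rw [if_neg hf]
    simp [hf]

lemma map_range_set (f : Nat → List String) (i : Nat) (v : List String) :
    ((List.range 11).map f).set i v = (List.range 11).map (fun j => if j = i then v else f j) := by
  apply List.ext_getElem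
  · simp
  · intro k hk1 hk2
    simp only [List.getElem_set, List.getElem_map, List.getElem_range]
    by_cases hk : k = i
    · simp [hk]
    · simp [hk, Ne.symm hk]

lemma B_inv (ll : List String) :
    ∀ (t p : List String), ll = p ++ t →
    t.foldl (fun (st : List (List String) × List String × PySem.Set String) n =>
        let buckets := st.1
        let non_light_passes := st.2.1
        let seen := st.2.2
        match firstKwAux LIGHTPASSES 0 (PySem.Str.lower n) with
        | none => (buckets, non_light_passes ++ [n], seen)
        | some i =>
          if n ∉ seen then (buckets.set i (buckets.getD i [] ++ [n]), non_light_passes, seen.add n)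
          else st)
      ((List.range 11).map (fun i => canonB i p), canonN p, seenOf p)
    = ((List.range 11).map (fun i => canonB i ll), canonN ll, seenOf ll) := by
  intro t
  induction t with
  | nil => intro p h; rw [List.append_nil] at h; subst h; rfl
  | cons n t ih =>
    intro p h
    rw [List.foldl_cons]
    have hstep :
        (fun (st : List (List String) × List String × PySem.Set String) n =>
          let buckets := st.1
          let non_light_passes := st.2.1
          let seen := st.2.2
          match firstKwAux LIGHTPASSES 0 (PySem.Str.lower n) with
          | none => (buckets, non_light_passes ++ [n], seen)
          | some i =>
            if n ∉ seen then (buckets.set i (buckets.getD i [] ++ [n]), non_light_passes, seen.add n)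
            else st)
          ((List.range 11).map (fun i => canonB i p), canonN p, seenOf p) n
        = ((List.range 11).map (fun i => canonB i (p ++ [n])), canonN (p ++ [n]), seenOf (p ++ [n])) := by
      cases hfk : fkOf n with
      | none =>
        have hfk' : firstKwAux LIGHTPASSES 0 (PySem.Str.lower n) = none := hfk
        have h1 : ∀ i, canonB i (p ++ [n]) = canonB i p := fun i => by
          rw [canonB_snoc, if_neg (by rintro ⟨hfi, -⟩; rw [hfk] at hfi; simp at hfi)]
        have h2 : canonN (p ++ [n]) = canonN p ++ [n] := by rw [canonN_snoc, if_pos hfk]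
        have h3 : seenOf (p ++ [n]) = seenOf p := by rw [seenOf_snoc, if_neg (by simp [hfk])]
        simp only [hfk', h2, h3]
        have hmap : (List.range 11).map (fun i => canonB i (p ++ [n]))
            = (List.range 11).map (fun i => canonB i p) := by simp [h1]
        exact congrArg (fun b => (b, canonN p ++ [n], seenOf p)) hmap.symm
      | some i =>
        have hfk' : firstKwAux LIGHTPASSES 0 (PySem.Str.lower n) = some i := hfk
        obtain ⟨hlt, -⟩ := fkOf_some n i hfk
        have h2 : canonN (p ++ [n]) = canonN p := by
          rw [canonN_snoc, if_neg (by rw [hfk]; simp)]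
        by_cases hseen : n ∈ seenOf p
        · have hp : n ∈ p := ((mem_seenOf p n).mp hseen).1
          have h1 : ∀ i', canonB i' (p ++ [n]) = canonB i' p := fun i' => by
            rw [canonB_snoc, if_neg (by rintro ⟨-, hnp⟩; exact hnp hp)]
          have h3 : seenOf (p ++ [n]) = seenOf p := by
            rw [seenOf_snoc, if_pos (by simp [hfk])]
            unfold PySem.Set.add
            have hc : (seenOf p).contains n = true := by simpa [List.contains_iff_mem] using hseen
            rw [if_pos hc]
          simp only [hfk', h2, h3]
          rw [if_neg (by simp [hseen])]
          have hmap : (List.range 11).map (fun i' => canonB i' (p ++ [n]))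
              = (List.range 11).map (fun i' => canonB i' p) := by simp [h1]
          exact congrArg (fun b => (b, canonN p, seenOf p)) hmap.symm
        · have hp : n ∉ p := fun hnp => hseen ((mem_seenOf p n).mpr ⟨hnp, by simp [hfk]⟩)
          have h3 : seenOf (p ++ [n]) = (seenOf p).add n := by
            rw [seenOf_snoc, if_pos (by simp [hfk])]
          have hgetD : ((List.range 11).map (fun i' => canonB i' p)).getD i [] = canonB i p := by
            rw [List.getD_eq_getElem?_getD]
            simp [hlt]
          have hset : ((List.range 11).map (fun i' => canonB i' p)).set i (canonB i p ++ [n])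
              = (List.range 11).map (fun i' => canonB i' (p ++ [n])) := by
            rw [map_range_set]
            apply List.map_congr_left
            intro j hj
            rw [List.mem_range] at hj
            by_cases hji : j = i
            · subst hji
              rw [if_pos rfl, canonB_snoc, if_pos ⟨hfk, hp⟩]
            · rw [if_neg hji, canonB_snoc,
                if_neg (by rintro ⟨hfj, -⟩; rw [hfk] at hfj; exact hji (Option.some.inj hfj).symm)]
          simp only [hfk', h2, h3]
          rw [if_pos (by simp [hseen]), hgetD, hset]
    have hgoal := ih (p ++ [n]) (by simp [h])
    rw [← hstep] at hgoal
    exact hgoal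

lemma B_char (ll : List String) :
    prepareForAutoComp_alt ll = (canonPartial 11 ll, canonN ll) := by
  exact congrArg (fun st : List (List String) × List String × PySem.Set String =>
    (st.1.flatten, st.2.1)) (B_inv ll ll [] (by simp))

-- ===== VERDICT (by name: the statement is the Claim_ definition above) =====
theorem prepareForAutoComp_spec : Claim_equal_prepareForAutoComp := by
  intro ll _
  unfold Spec_prepareForAutoComp
  rw [A_char, B_char]
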